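-- pv_equiv track=rewrite | github.com/Camilocastellanos1002/Learning-Python | clase9 (12-10-2023)/contaminacion.py | menor_problem
-- ===== SOURCE A (Python) =====
-- def menor_problem(names,smells,illegal_towns,pollution_rivers):
--     sum=[]
--     for i in range(len(names)):
--         sum.append(smells[i]+illegal_towns[i]+pollution_rivers[i])
--     menor=min(sum)
--     position=sum.index(menor)
--     town=names[position]
--     return menor,town
-- ===== SOURCE B (Python) =====
-- def menor_problem(names, smells, illegal_towns, pollution_rivers):
--     best = None
--     for name, a, b, c in zip(names, smells, illegal_towns, pollution_rivers):
--         s = a + b + c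
--         if best is None or s < best[0]:
--             best = (s, name)
--     if best is None:
--         raise ValueError("min() arg is an empty sequence")
--     return best
-- ===== Notes on version B (the rewrite author's own statement) =====
-- stated objective: simpler
-- what changed: Replaces the three-phase pipeline (build a sums list, min() over it, list.index to recover the position, then index names) with one pass over zip(names, smells, illegal_towns, pollution_rivers) that keeps the best (sum, town) pair, updating only on strict < so the first minimum wins as in A.
import Mathlib
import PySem

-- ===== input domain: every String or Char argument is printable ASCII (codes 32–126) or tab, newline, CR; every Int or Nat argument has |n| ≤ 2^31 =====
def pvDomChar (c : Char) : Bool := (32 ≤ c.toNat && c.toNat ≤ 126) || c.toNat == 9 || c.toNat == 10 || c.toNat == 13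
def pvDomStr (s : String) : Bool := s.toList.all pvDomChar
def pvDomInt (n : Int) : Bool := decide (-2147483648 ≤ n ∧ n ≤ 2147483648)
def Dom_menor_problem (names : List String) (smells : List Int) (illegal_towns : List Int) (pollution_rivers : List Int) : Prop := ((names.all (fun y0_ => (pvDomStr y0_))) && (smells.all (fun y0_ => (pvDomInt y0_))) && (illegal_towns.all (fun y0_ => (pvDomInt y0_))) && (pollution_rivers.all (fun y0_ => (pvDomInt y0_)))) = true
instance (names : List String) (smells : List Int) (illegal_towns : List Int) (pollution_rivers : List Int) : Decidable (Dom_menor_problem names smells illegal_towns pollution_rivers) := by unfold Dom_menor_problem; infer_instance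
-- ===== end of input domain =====

-- B replaces A's three-phase pipeline (build a sums list, min() over it, list.index to
-- recover the position, then index names) by one zip pass keeping the best (sum, town)
-- pair, updating on strict < so the first minimum wins; objective: simpler.

-- ===== PORT A =====
def menor_problem (names : List String) (smells : List Int) (illegal_towns : List Int) (pollution_rivers : List Int) : Int × String :=
  let sums := (PySem.List.pyRange 0 (names.length : Int) 1).foldl
    (fun acc i => acc ++ [PySem.List.pyGetD smells i 0 + PySem.List.pyGetD illegal_towns i 0 + PySem.List.pyGetD pollution_rivers i 0]) []
  let menor := (PySem.List.min? sums (fun x => x)).getD 0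
  let position := (PySem.List.index? sums menor).getD 0
  let town := PySem.List.pyGetD names (position : Int) ""
  (menor, town)

-- ===== PORT B =====
def menor_problem_alt (names : List String) (smells : List Int) (illegal_towns : List Int) (pollution_rivers : List Int) : Int × String :=
  let best := (names.zip (smells.zip (illegal_towns.zip pollution_rivers))).foldl
    (fun best q =>
      let s := q.2.1 + q.2.2.1 + q.2.2.2
      match best with
      | none => some (s, q.1)
      | some b => if s < b.1 then some (s, q.1) else some b)
    none
  match best with
  | some r => r
  | none => (0, "")

-- ===== PRECONDITION & SPEC =====
-- A raises ValueError (min of an empty list) when names = [] and IndexError when one of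
-- the three score lists is shorter than names; exactly those inputs are excluded.
def Pre_menor_problem (names : List String) (smells : List Int) (illegal_towns : List Int) (pollution_rivers : List Int) : Prop :=
  names ≠ [] ∧ names.length ≤ smells.length ∧ names.length ≤ illegal_towns.length ∧ names.length ≤ pollution_rivers.length
instance (names : List String) (smells : List Int) (illegal_towns : List Int) (pollution_rivers : List Int) : Decidable (Pre_menor_problem names smells illegal_towns pollution_rivers) := by unfold Pre_menor_problem; infer_instance
def pvWitness_menor_problem : List String × List Int × List Int × List Int :=
  (["ayeres", "bmont", "cvilla"], [3, 1, 2], [0, 4, 0], [2, 0, 5])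

def Spec_menor_problem (names : List String) (smells : List Int) (illegal_towns : List Int) (pollution_rivers : List Int) (out : Int × String) : Prop := out = menor_problem_alt names smells illegal_towns pollution_rivers
instance (names : List String) (smells : List Int) (illegal_towns : List Int) (pollution_rivers : List Int) (out : Int × String) : Decidable (Spec_menor_problem names smells illegal_towns pollution_rivers out) := by unfold Spec_menor_problem; infer_instance

-- ===== CLAIM (what is proved, stated in full; the proofs are below) =====
def Claim_equal_menor_problem : Prop := ∀ (names : List String) (smells : List Int) (illegal_towns : List Int) (pollution_rivers : List Int), Dom_menor_problem names smells illegal_towns pollution_rivers → Pre_menor_problem names smells illegal_towns pollution_rivers → Spec_menor_problem names smells illegal_towns pollution_rivers (menor_problem names smells illegal_towns pollution_rivers)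

-- ===== LEMMAS AND PROOFS =====

-- (sum, name) pairs of the four zipped input lists (truncates at the shortest, like zip)
def pvPairs : List String → List Int → List Int → List Int → List (Int × String)
  | n :: ns, a :: as, b :: bs, c :: cs => (a + b + c, n) :: pvPairs ns as bs cs
  | _, _, _, _ => []

-- B's running best on a pair list, seeded with the first pair
def pvFmin : List (Int × String) → Int × String → Int × String
  | [], acc => acc
  | p :: ps, acc => pvFmin ps (if p.1 < acc.1 then p else acc)

lemma pvPairs_eq_zip_map : ∀ (ns : List String) (as bs cs : List Int),
    pvPairs ns as bs cs
      = (ns.zip (as.zip (bs.zip cs))).map (fun q => (q.2.1 + q.2.2.1 + q.2.2.2, q.1)) := by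
  intro ns
  induction ns with
  | nil => intro as bs cs; simp [pvPairs]
  | cons n ns ih =>
    intro as bs cs
    cases as with
    | nil => simp [pvPairs]
    | cons a as =>
      cases bs with
      | nil => simp [pvPairs]
      | cons b bs =>
        cases cs with
        | nil => simp [pvPairs]
        | cons c cs => simp [pvPairs, ih]

lemma pvPairs_map_snd : ∀ (ns : List String) (as bs cs : List Int),
    ns.length ≤ as.length → ns.length ≤ bs.length → ns.length ≤ cs.length →
    (pvPairs ns as bs cs).map Prod.snd = ns := by
  intro ns
  induction ns with
  | nil => intro as bs cs _ _ _; simp [pvPairs]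
  | cons n ns ih =>
    intro as bs cs ha hb hc
    cases as with
    | nil => simp at ha
    | cons a as =>
      cases bs with
      | nil => simp at hb
      | cons b bs =>
        cases cs with
        | nil => simp at hc
        | cons c cs =>
          simp only [pvPairs, List.map_cons, List.cons.injEq, true_and]
          exact ih as bs cs (by simpa using ha) (by simpa using hb) (by simpa using hc)

-- A's sums list is the first projection of the pair list
lemma pvSums_eq_map_fst : ∀ (ns : List String) (as bs cs : List Int),
    ns.length ≤ as.length → ns.length ≤ bs.length → ns.length ≤ cs.length →
    (List.range ns.length).map
        (fun k => as.getD k 0 + bs.getD k 0 + cs.getD k 0)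
      = (pvPairs ns as bs cs).map Prod.fst := by
  intro ns
  induction ns with
  | nil => intro as bs cs _ _ _; simp [pvPairs]
  | cons n ns ih =>
    intro as bs cs ha hb hc
    cases as with
    | nil => simp at ha
    | cons a as =>
      cases bs with
      | nil => simp at hb
      | cons b bs =>
        cases cs with
        | nil => simp at hc
        | cons c cs =>
          rw [List.length_cons, List.range_succ_eq_map, List.map_cons, List.map_map]
          simp only [pvPairs, List.map_cons, List.getD_cons_zero, List.cons.injEq, true_and]
          exact ih as bs cs (by simpa using ha) (by simpa using hb) (by simpa using hc)

-- first-minimum characterisation: pvFmin ps p sits at the index that list.index finds for the running minimum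
lemma pvFmin_index : ∀ (ps : List (Int × String)) (p : Int × String),
    ∃ k, PySem.List.index? ((p :: ps).map Prod.fst) ((ps.map Prod.fst).foldl min p.1) = some k
      ∧ (p :: ps)[k]? = some (pvFmin ps p) := by
  intro ps
  induction ps with
  | nil =>
    intro p
    exact ⟨0, by simp, by simp [pvFmin]⟩
  | cons q ps ih =>
    intro p
    by_cases h : q.1 < p.1
    · obtain ⟨k, hk, hg⟩ := ih q
      have hmin : (ps.map Prod.fst).foldl min q.1 ≤ q.1 :=
        (PySem.List.foldl_min_le _ _).1
      have hne : p.1 ≠ (ps.map Prod.fst).foldl min q.1 := by omega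
      have hmq : min p.1 q.1 = q.1 := by omega
      refine ⟨k + 1, ?_, ?_⟩
      · rw [List.map_cons, List.map_cons, List.foldl_cons, hmq]
        rw [List.map_cons] at hk
        rw [PySem.List.index?_cons_of_ne _ hne, hk]
        rfl
      · simpa [pvFmin, h] using hg
    · obtain ⟨k, hk, hg⟩ := ih p
      have hpq : p.1 ≤ q.1 := by omega
      have hmineq : min p.1 q.1 = p.1 := by omega
      have hm' : ((q :: ps).map Prod.fst).foldl min p.1 = (ps.map Prod.fst).foldl min p.1 := by
        simp [List.foldl_cons, hmineq]
      have hfm : pvFmin (q :: ps) p = pvFmin ps p := by simp [pvFmin, h]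
      rw [List.map_cons] at hk
      cases k with
      | zero =>
        obtain ⟨hlt, hv, _⟩ := PySem.List.getElem_of_index?_eq_some hk
        have hp1 : p.1 = (ps.map Prod.fst).foldl min p.1 := by simpa using hv
        refine ⟨0, ?_, ?_⟩
        · rw [hm', ← hp1, List.map_cons]
          exact PySem.List.index?_cons_self _ _
        · simp only [List.getElem?_cons_zero] at hg ⊢
          rw [hfm, ← Option.some_inj.mp hg]
      | succ j =>
        obtain ⟨hlt, hv, hfirst⟩ := PySem.List.getElem_of_index?_eq_some hk
        have hp1ne : p.1 ≠ (ps.map Prod.fst).foldl min p.1 := by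
          have := hfirst 0 (by omega)
          simpa using this
        have hmle : (ps.map Prod.fst).foldl min p.1 ≤ p.1 :=
          (PySem.List.foldl_min_le _ _).1
        have hq1ne : q.1 ≠ (ps.map Prod.fst).foldl min p.1 := by omega
        have hrest : PySem.List.index? (ps.map Prod.fst) ((ps.map Prod.fst).foldl min p.1) = some j := by
          rw [PySem.List.index?_cons_of_ne _ hp1ne] at hk
          cases hidx : PySem.List.index? (ps.map Prod.fst) ((ps.map Prod.fst).foldl min p.1) with
          | none => rw [hidx] at hk; simp at hk
          | some j' =>
            rw [hidx] at hk
            simp only [Option.map_some, Option.some.injEq] at hk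
            simp only [Option.some.injEq]
            omega
        refine ⟨j + 2, ?_, ?_⟩
        · rw [hm', List.map_cons, List.map_cons,
            PySem.List.index?_cons_of_ne _ hp1ne,
            PySem.List.index?_cons_of_ne _ hq1ne, hrest]
          rfl
        · rw [hfm]
          simp only [List.getElem?_cons_succ] at hg ⊢
          exact hg

lemma pvFoldl_some : ∀ (ps : List (Int × String)) (a : Int × String),
    ps.foldl (fun best p => match best with
      | none => some p
      | some b2 => if p.1 < b2.1 then some p else some b2) (some a)
      = some (pvFmin ps a) := by
  intro ps
  induction ps with
  | nil => intro a; simp [pvFmin]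
  | cons p ps ih =>
    intro a
    simp only [List.foldl_cons, pvFmin]
    rw [← ih (if p.1 < a.1 then p else a)]
    congr 1
    by_cases h : p.1 < a.1 <;> simp [h]

-- the two ports agree on any nonempty, long-enough input
lemma pvMain (names : List String) (smells illegal_towns pollution_rivers : List Int)
    (hne : names ≠ []) (ha : names.length ≤ smells.length)
    (hb : names.length ≤ illegal_towns.length) (hc : names.length ≤ pollution_rivers.length) :
    menor_problem names smells illegal_towns pollution_rivers
      = menor_problem_alt names smells illegal_towns pollution_rivers := by
  cases names with
  | nil => exact absurd rfl hne
  | cons n ns =>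
  cases smells with
  | nil => simp at ha
  | cons a as =>
  cases illegal_towns with
  | nil => simp at hb
  | cons b bs =>
  cases pollution_rivers with
  | nil => simp at hc
  | cons c cs =>
  -- A's sums list is the fst-projection of the pair list
  have hsums : (PySem.List.pyRange 0 ((n :: ns).length : Int) 1).foldl
      (fun acc i => acc ++ [PySem.List.pyGetD (a :: as) i 0 + PySem.List.pyGetD (b :: bs) i 0 + PySem.List.pyGetD (c :: cs) i 0]) []
      = (pvPairs (n :: ns) (a :: as) (b :: bs) (c :: cs)).map Prod.fst := by
    rw [PySem.List.foldl_append_singleton_eq_map, PySem.List.pyRange_one, List.map_map]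
    rw [← pvSums_eq_map_fst (n :: ns) (a :: as) (b :: bs) (c :: cs) ha hb hc]
    apply List.map_congr_left
    intro k hk
    simp
  obtain ⟨k, hk, hg⟩ := pvFmin_index (pvPairs ns as bs cs) (a + b + c, n)
  have hpairs : pvPairs (n :: ns) (a :: as) (b :: bs) (c :: cs)
      = (a + b + c, n) :: pvPairs ns as bs cs := rfl
  have hk' : PySem.List.index? ((a + b + c) :: (pvPairs ns as bs cs).map Prod.fst)
      (((pvPairs ns as bs cs).map Prod.fst).foldl min (a + b + c)) = some k := by
    simpa using hk
  -- the first component of the selected pair is the minimum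
  have hAfst : ((pvPairs ns as bs cs).map Prod.fst).foldl min (a + b + c)
      = (pvFmin (pvPairs ns as bs cs) (a + b + c, n)).1 := by
    obtain ⟨hlt, hv, _⟩ := PySem.List.getElem_of_index?_eq_some hk'
    have h1 : ((a + b + c) :: (pvPairs ns as bs cs).map Prod.fst)[k]?
        = (((a + b + c, n) :: pvPairs ns as bs cs)[k]?).map Prod.fst := by
      rw [show (a + b + c) :: (pvPairs ns as bs cs).map Prod.fst
            = ((a + b + c, n) :: pvPairs ns as bs cs).map Prod.fst from rfl,
          List.getElem?_map]
    rw [List.getElem?_eq_getElem hlt, hg] at h1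
    rw [← hv, Option.some_inj.mp h1]
  -- the second component is the town A indexes
  have htown : (n :: ns).getD k ""
      = (pvFmin (pvPairs ns as bs cs) (a + b + c, n)).2 := by
    have hsnd := pvPairs_map_snd (n :: ns) (a :: as) (b :: bs) (c :: cs) ha hb hc
    have h2 : ((pvPairs (n :: ns) (a :: as) (b :: bs) (c :: cs)).map Prod.snd)[k]?
        = ((pvPairs (n :: ns) (a :: as) (b :: bs) (c :: cs))[k]?).map Prod.snd := by
      rw [List.getElem?_map]
    rw [hsnd, hpairs, hg] at h2
    rw [List.getD_eq_getElem?_getD, h2]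
    rfl
  -- evaluate A
  have hA : menor_problem (n :: ns) (a :: as) (b :: bs) (c :: cs)
      = ((pvFmin (pvPairs ns as bs cs) (a + b + c, n)).1,
         (pvFmin (pvPairs ns as bs cs) (a + b + c, n)).2) := by
    unfold menor_problem
    simp only [hsums, hpairs, List.map_cons, PySem.List.min?_id_cons, Option.getD_some, hk',
      PySem.List.pyGetD_natCast, Prod.mk.injEq]
    exact ⟨hAfst, htown⟩
  -- evaluate B
  have hB : menor_problem_alt (n :: ns) (a :: as) (b :: bs) (c :: cs)
      = pvFmin (pvPairs ns as bs cs) (a + b + c, n) := by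
    unfold menor_problem_alt
    have hfold : ((n :: ns).zip ((a :: as).zip ((b :: bs).zip (c :: cs)))).foldl
        (fun best q =>
          let s := q.2.1 + q.2.2.1 + q.2.2.2
          match best with
          | none => some (s, q.1)
          | some b2 => if s < b2.1 then some (s, q.1) else some b2)
        none
        = (pvPairs (n :: ns) (a :: as) (b :: bs) (c :: cs)).foldl
          (fun best p => match best with
            | none => some p
            | some b2 => if p.1 < b2.1 then some p else some b2)
          (none : Option (Int × String)) := by
      rw [pvPairs_eq_zip_map, List.foldl_map]
    rw [hfold, hpairs, List.foldl_cons]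
    rw [show (match (none : Option (Int × String)) with
          | none => some (a + b + c, n)
          | some b2 => if (a + b + c, n).1 < b2.1 then some (a + b + c, n) else some b2)
        = some (a + b + c, n) from rfl]
    rw [pvFoldl_some]
  rw [hA, hB]

-- ===== VERDICT (by name: the statement is the Claim_ definition above) =====
theorem menor_problem_spec : Claim_equal_menor_problem := by
  intro names smells illegal_towns pollution_rivers _ hpre
  obtain ⟨hne, ha, hb, hc⟩ := hpre
  exact pvMain names smells illegal_towns pollution_rivers hne ha hb hc
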